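-- pv_equiv track=rewrite | github.com/yizhou7/verus-mariposa-qi | source/tools/mariposa_nlqi/plotter.py | get_column_stats
-- ===== SOURCE A (Python) =====
-- def smt_result_from_int(result):
--     result = int(result)
--     if result == 0:
--         return "unsat"
--     elif result == 2:
--         return "unknown"
--     elif result == 3:
--         return "timeout"
--     assert False
--
-- def get_column_stats(column):
--     num_unsat = 0
--     til_fe = len(column)
--     for i in range(len(column)):
--         res = smt_result_from_int(column[i][1])
--         if res == "unsat":
--             num_unsat += 1
--         else:
--             if til_fe == len(column):
--                 til_fe = i
--     # assume 0 step success
--     return num_unsat, til_fe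
-- ===== SOURCE B (Python) =====
-- def smt_result_from_int(result):
--     result = int(result)
--     if result == 0:
--         return "unsat"
--     elif result == 2:
--         return "unknown"
--     elif result == 3:
--         return "timeout"
--     assert False
--
-- def get_column_stats(column):
--     # Back-to-front pass: til_fe is maintained as the length of the maximal
--     # all-unsat prefix of the suffix processed so far (which, for the whole
--     # list, equals the index of the first non-unsat entry, or len(column)).
--     num_unsat = 0
--     til_fe = 0
--     for c in reversed(column):
--         if smt_result_from_int(c[1]) == "unsat":
--             num_unsat += 1
--             til_fe += 1
--         else:
--             til_fe = 0
--     return num_unsat, til_fe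
-- ===== Notes on version B (the rewrite author's own statement) =====
-- stated objective: alternative
-- what changed: Traverses the column back-to-front maintaining the length of the maximal all-unsat prefix of the processed suffix, so the first-non-unsat index falls out without A's index/sentinel machinery (til_fe == len comparison).
import Mathlib
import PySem

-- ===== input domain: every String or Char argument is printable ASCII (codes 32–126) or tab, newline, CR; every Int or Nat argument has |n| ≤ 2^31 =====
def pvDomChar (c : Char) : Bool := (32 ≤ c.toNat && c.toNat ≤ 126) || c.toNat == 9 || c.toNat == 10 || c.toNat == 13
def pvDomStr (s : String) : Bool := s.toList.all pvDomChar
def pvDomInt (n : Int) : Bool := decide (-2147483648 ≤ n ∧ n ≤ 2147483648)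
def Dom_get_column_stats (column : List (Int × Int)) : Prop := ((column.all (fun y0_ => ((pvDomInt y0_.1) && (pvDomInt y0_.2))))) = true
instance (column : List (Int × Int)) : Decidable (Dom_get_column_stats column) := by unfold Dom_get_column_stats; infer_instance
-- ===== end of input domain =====

-- B replaces A's forward index loop with its til_fe == len sentinel by a single
-- back-to-front pass maintaining the length of the maximal all-unsat prefix of
-- the processed suffix; objective: alternative.

-- ===== PORT A =====
-- smt_result_from_int; the 'assert False' branch (result ∉ {0,2,3}) raises in Python and is
-- excluded by Pre_get_column_stats; the port returns "" there (never reached inside Pre_).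
def smt_result_from_int (result : Int) : String :=
  if result = 0 then "unsat"
  else if result = 2 then "unknown"
  else if result = 3 then "timeout"
  else ""

-- the for-loop of A: structural recursion over the remaining column carrying i and the state
def getColGoA (n : Int) : List (Int × Int) → Int → Int → Int → Int × Int
  | [], _, nu, tf => (nu, tf)
  | c :: rest, i, nu, tf =>
    if smt_result_from_int c.2 = "unsat" then getColGoA n rest (i + 1) (nu + 1) tf
    else if tf = n then getColGoA n rest (i + 1) nu i
    else getColGoA n rest (i + 1) nu tf

def get_column_stats (column : List (Int × Int)) : Int × Int :=
  getColGoA (column.length : Int) column 0 0 (column.length : Int)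

-- ===== PORT B =====
-- B's loop 'for c in reversed(column)' : a fold over column.reverse carrying (num_unsat, til_fe)
def get_column_stats_alt (column : List (Int × Int)) : Int × Int :=
  column.reverse.foldl
    (fun (st : Int × Int) c =>
      if smt_result_from_int c.2 = "unsat" then (st.1 + 1, st.2 + 1) else (st.1, 0))
    (0, 0)

-- ===== PRECONDITION & SPEC =====
-- Pre_ excludes exactly the inputs on which Python A raises (AssertionError in
-- smt_result_from_int for a result value outside {0, 2, 3}).
def Pre_get_column_stats (column : List (Int × Int)) : Prop :=
  (column.all (fun c => c.2 == 0 || c.2 == 2 || c.2 == 3)) = true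
instance (column : List (Int × Int)) : Decidable (Pre_get_column_stats column) := by
  unfold Pre_get_column_stats; infer_instance
def pvWitness_get_column_stats : (List (Int × Int)) := [(1, 0), (2, 2), (3, 0)]

def Spec_get_column_stats (column : List (Int × Int)) (out : Int × Int) : Prop := out = get_column_stats_alt column
instance (column : List (Int × Int)) (out : Int × Int) : Decidable (Spec_get_column_stats column out) := by unfold Spec_get_column_stats; infer_instance

-- ===== CLAIM (what is proved, stated in full; the proofs are below) =====
def Claim_equal_get_column_stats : Prop := ∀ (column : List (Int × Int)), Dom_get_column_stats column → Pre_get_column_stats column → Spec_get_column_stats column (get_column_stats column)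

-- ===== LEMMAS AND PROOFS =====

-- length of the maximal all-unsat prefix; both programs' til_fe equals this
def prefUnsat : List (Int × Int) → Int
  | [] => 0
  | c :: rest => if smt_result_from_int c.2 = "unsat" then 1 + prefUnsat rest else 0

-- A's loop, characterised
lemma getColGoA_eq (n : Int) (l : List (Int × Int)) : ∀ (i nu tf : Int),
    i + (l.length : Int) ≤ n →
    getColGoA n l i nu tf =
      (nu + (l.countP (fun c => smt_result_from_int c.2 == "unsat") : Nat),
       if tf = n then
         if prefUnsat l = (l.length : Int) then tf else i + prefUnsat l
       else tf) := by
  induction l with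
  | nil =>
    intro i nu tf _
    simp [getColGoA, prefUnsat]
  | cons c rest ih =>
    intro i nu tf h
    have hlen : (0 : Int) ≤ (rest.length : Int) := Int.natCast_nonneg _
    simp only [List.length_cons] at h
    have hrest : (i + 1) + (rest.length : Int) ≤ n := by push_cast at h ⊢; omega
    by_cases hu : smt_result_from_int c.2 = "unsat"
    · rw [getColGoA, if_pos hu, ih _ _ _ hrest]
      simp only [prefUnsat, List.countP_cons, hu, List.length_cons, Prod.mk.injEq]
      refine ⟨by simp; ring, ?_⟩
      split_ifs with h1 h2 h3 h4 <;> push_cast at * <;> omega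
    · rw [getColGoA, if_neg hu, prefUnsat]
      simp only [if_neg hu, List.countP_cons, List.length_cons]
      by_cases htf : tf = n
      · rw [if_pos htf, ih _ _ _ hrest]
        have hi : i ≠ n := by push_cast at h; omega
        simp [hu, hi, htf]
        omega
      · rw [if_neg htf, ih _ _ _ hrest]
        simp [hu, htf]

-- B's fold, characterised
lemma altB_eq (l : List (Int × Int)) :
    get_column_stats_alt l =
      ((l.countP (fun c => smt_result_from_int c.2 == "unsat") : Int), prefUnsat l) := by
  unfold get_column_stats_alt
  induction l with
  | nil => simp [prefUnsat]
  | cons c rest ih =>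
    rw [List.reverse_cons, List.foldl_append]
    rw [ih]
    by_cases hu : smt_result_from_int c.2 = "unsat" <;>
      simp [List.foldl, hu, prefUnsat]; ring

-- ===== VERDICT (by name: the statement is the Claim_ definition above) =====
theorem get_column_stats_spec : Claim_equal_get_column_stats := by
  intro column _ _
  unfold Spec_get_column_stats get_column_stats
  rw [getColGoA_eq _ _ 0 0 _ (by simp), altB_eq]
  by_cases hp : prefUnsat column = (column.length : Int) <;> simp [hp]
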